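-- pv_equiv track=rewrite | github.com/miliar/Code_Jam_Webscraper | solutions_python/solutions_year17_round0_nr2/573.py | last_tidy_number
-- ===== SOURCE A (Python) =====
-- def last_tidy_number(number):
--     i = 1
--     while not is_tidy(number):
--         prev = get_digit(number, i - 1)
--         curr = get_digit(number, i)
--         if curr > prev:
--             diff = get_digits_upto(number, i - 1) + 1
--             number -= diff
--         i += 1
--     return number
--
-- def is_tidy(n):
--     digits = str(n)
--     prev = '0'
--     for d in digits:
--         if d < prev:
--             return False
--         prev = d
--     return True
--
-- def get_digit(number, place):
--     return int(str(number)[-place - 1])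
--
-- def get_digits_upto(number, place):
--     return int(str(number)[-place - 1:])
-- ===== SOURCE B (Python) =====
-- def last_tidy_number(number):
--     suffix = []
--     for ch in reversed(str(number)):
--         d = int(ch)
--         if suffix and d > suffix[0]:
--             suffix = [d - 1] + [9] * len(suffix)
--         else:
--             suffix = [d] + suffix
--     result = 0
--     for d in suffix:
--         result = 10 * result + d
--     return result
-- ===== Notes on version B (the rewrite author's own statement) =====
-- stated objective: simpler
-- what changed: A repeatedly re-stringifies the whole number, rescans it for tidiness and subtracts int-valued suffixes; B makes one right-to-left pass over the digit list, decrementing a digit and replacing the suffix by 9s whenever a violation is seen, then reassembles the value.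
import Mathlib
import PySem

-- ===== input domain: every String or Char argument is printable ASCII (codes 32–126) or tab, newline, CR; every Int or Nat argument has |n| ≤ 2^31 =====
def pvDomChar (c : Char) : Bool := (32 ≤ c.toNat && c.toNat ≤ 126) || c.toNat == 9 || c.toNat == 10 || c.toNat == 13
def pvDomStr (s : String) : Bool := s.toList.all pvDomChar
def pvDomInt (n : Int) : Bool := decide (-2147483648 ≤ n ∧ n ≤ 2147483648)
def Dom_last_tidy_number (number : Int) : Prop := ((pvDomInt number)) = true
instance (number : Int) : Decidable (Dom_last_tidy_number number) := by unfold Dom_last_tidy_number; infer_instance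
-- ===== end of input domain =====

-- B replaces A's repeated tidiness rescans/suffix subtractions by a single right-to-left
-- digit pass (decrement at a violation, nine out the suffix); objective: simpler.


-- ===== PORT A =====

-- is_tidy: scan the characters of str(n), prev starts at '0'
def isTidyGo : List Char → Char → Bool
  | [], _ => true
  | d :: ds, prev => if d < prev then false else isTidyGo ds d

def is_tidyA (n : Int) : Bool := isTidyGo (PySem.Int.toChars n) '0'

-- int(s) ported by hand (PySem.Int.ofChars? computes the same value but has no usable
-- lemma API here); exact for the nonempty all-digit strings that arise on the admitted
-- domain number ≥ 0 (none = ValueError elsewhere, e.g. on the '-' of a negative number).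
def intDigits? (cs : List Char) : Option Int :=
  if cs ≠ [] ∧ cs.all PySem.Chars.isdigit
  then some (cs.foldl (fun a c => 10 * a + ((c.toNat : Int) - 48)) 0)
  else none

-- int(str(number)[-place - 1])
def get_digitA (number place : Int) : Option Int :=
  (PySem.Chars.pyGet? (PySem.Int.toChars number) (-place - 1)).bind (fun c => intDigits? [c])

-- int(str(number)[-place - 1:])
def get_digits_uptoA (number place : Int) : Option Int :=
  intDigits? (PySem.Chars.slice (PySem.Int.toChars number) (some (-place - 1)) none)

-- A's while loop; i increments every iteration and never exceeds the digit count before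
-- the loop exits on the admitted domain, so fuel 64 only totalizes the recursion
-- (the `none`/fuel-exhaustion fallbacks are Python's exceptions, excluded by Pre_).
def tidyLoopA : Nat → Int → Int → Int
  | 0, number, _ => number
  | fuel + 1, number, i =>
    if is_tidyA number then number
    else
      match get_digitA number (i - 1), get_digitA number i with
      | some prev, some curr =>
        if curr > prev then
          match get_digits_uptoA number (i - 1) with
          | some v => tidyLoopA fuel (number - (v + 1)) (i + 1)
          | none => number
        else tidyLoopA fuel number (i + 1)
      | _, _ => number

def last_tidy_number (number : Int) : Int := tidyLoopA 64 number 1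

-- ===== PORT B =====

-- one step of the backward pass: d against the already-processed suffix
def tidyStep (d : Int) (suffix : List Int) : List Int :=
  match suffix with
  | [] => [d]
  | h :: t => if d > h then (d - 1) :: List.replicate (t.length + 1) 9 else d :: h :: t

-- int(ch) ported as the code-point offset; exact for the digit characters str(number)
-- yields on the admitted domain number ≥ 0 (elsewhere Python raises ValueError, excluded by Pre_).
def last_tidy_number_alt (number : Int) : Int :=
  let suffix := ((PySem.Int.toChars number).reverse).foldl
    (fun s c => tidyStep ((c.toNat : Int) - 48) s) []
  suffix.foldl (fun r d => 10 * r + d) 0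

-- ===== PRECONDITION & SPEC =====
-- Pre_ excludes negative numbers, on which Python's A raises ValueError
-- (get_digit/int hit the '-' sign; B raises ValueError there too).
def Pre_last_tidy_number (number : Int) : Prop := 0 ≤ number
instance (number : Int) : Decidable (Pre_last_tidy_number number) := by unfold Pre_last_tidy_number; infer_instance

def pvWitness_last_tidy_number : Int := 332

def Spec_last_tidy_number (number : Int) (out : Int) : Prop := out = last_tidy_number_alt number
instance (number : Int) (out : Int) : Decidable (Spec_last_tidy_number number out) := by unfold Spec_last_tidy_number; infer_instance

-- ===== CLAIM (what is proved, stated in full; the proofs are below) =====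
def Claim_equal_last_tidy_number : Prop := ∀ (number : Int), Dom_last_tidy_number number → Pre_last_tidy_number number → Spec_last_tidy_number number (last_tidy_number number)

-- ===== LEMMAS AND PROOFS =====

-- big-endian decimal digits of a natural number, as Ints
def digitsBE (n : Nat) : List Int :=
  if h : n < 10 then [(n : Int)] else digitsBE (n / 10) ++ [((n % 10 : Nat) : Int)]
  decreasing_by exact Nat.div_lt_self (by omega) (by omega)

def charOf (d : Int) : Char := Nat.digitChar d.toNat

def valD (ds : List Int) : Int := ds.foldl (fun a d => 10 * a + d) 0

def TidyL (ds : List Int) : Prop := List.IsChain (· ≤ ·) ds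

def OkD (ds : List Int) : Prop := ∀ d ∈ ds, 0 ≤ d ∧ d < 10

def Canon (ds : List Int) : Prop := ds ≠ [] ∧ OkD ds ∧ (1 < ds.length → 0 < ds.head!)

lemma valD_foldl (a : Int) (ds : List Int) :
    ds.foldl (fun x d => 10 * x + d) a = a * 10 ^ ds.length + valD ds := by
  induction ds generalizing a with
  | nil => simp [valD]
  | cons d t ih =>
    simp only [List.foldl_cons, List.length_cons, valD]
    rw [ih (10 * a + d), ih (10 * 0 + d)]
    ring

lemma valD_cons (d : Int) (t : List Int) : valD (d :: t) = d * 10 ^ t.length + valD t := by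
  show t.foldl (fun x d => 10 * x + d) (10 * 0 + d) = _
  rw [valD_foldl]
  ring

lemma valD_append (xs ys : List Int) :
    valD (xs ++ ys) = valD xs * 10 ^ ys.length + valD ys := by
  unfold valD
  rw [List.foldl_append, valD_foldl]
  rfl

lemma valD_nonneg (ds : List Int) (h : ∀ d ∈ ds, 0 ≤ d) : 0 ≤ valD ds := by
  induction ds with
  | nil => simp [valD]
  | cons d t ih =>
    rw [valD_cons]
    have hd := h d (by simp)
    have ht := ih (fun x hx => h x (by simp [hx]))
    have : (0:Int) ≤ 10 ^ t.length := by positivity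
    nlinarith

lemma valD_replicate9 (k : Nat) : valD (List.replicate k 9) = 10 ^ k - 1 := by
  induction k with
  | zero => simp [valD]
  | succ m ih =>
    rw [List.replicate_succ, valD_cons, List.length_replicate, ih]
    ring

lemma digitsBE_ne_nil (n : Nat) : digitsBE n ≠ [] := by
  unfold digitsBE
  split <;> simp

lemma digitsBE_ok (n : Nat) : OkD (digitsBE n) := by
  induction n using Nat.strong_induction_on with
  | _ n ih =>
    unfold digitsBE
    split
    · intro d hd
      simp at hd
      omega
    · intro d hd
      rw [List.mem_append] at hd
      rcases hd with hd | hd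
      · exact ih (n / 10) (Nat.div_lt_self (by omega) (by omega)) d hd
      · simp at hd
        subst hd
        have := Nat.mod_lt n (show 0 < 10 by omega)
        omega

lemma valD_digitsBE (n : Nat) : valD (digitsBE n) = (n : Int) := by
  induction n using Nat.strong_induction_on with
  | _ n ih =>
    unfold digitsBE
    split
    · simp [valD]
    · rw [valD_append, ih (n / 10) (Nat.div_lt_self (by omega) (by omega))]
      have h1 : valD [((n % 10 : Nat) : Int)] = ((n % 10 : Nat) : Int) := by simp [valD]
      have h2 : ([((n % 10 : Nat) : Int)]).length = 1 := rfl
      rw [h1, h2]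
      have := Nat.div_add_mod n 10
      push_cast
      omega

lemma digitsBE_head_pos (n : Nat) (h : 0 < n) : 0 < (digitsBE n).head! := by
  induction n using Nat.strong_induction_on with
  | _ n ih =>
    unfold digitsBE
    split
    · simpa using h
    · obtain ⟨d, t, heq⟩ := List.exists_cons_of_ne_nil (digitsBE_ne_nil (n / 10))
      have hh := ih (n / 10) (Nat.div_lt_self (by omega) (by omega)) (by omega)
      rw [heq] at hh ⊢
      simpa using hh

lemma digitsBE_canon (n : Nat) : Canon (digitsBE n) := by
  refine ⟨digitsBE_ne_nil n, digitsBE_ok n, fun hlen => ?_⟩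
  apply digitsBE_head_pos
  by_contra h
  have : n = 0 := by omega
  subst this
  have : digitsBE 0 = [(0 : Int)] := by unfold digitsBE; simp
  rw [this] at hlen
  simp at hlen

lemma digitsBE_length_le (k n : Nat) (hk : 1 ≤ k) (h : n < 10 ^ k) :
    (digitsBE n).length ≤ k := by
  induction n using Nat.strong_induction_on generalizing k with
  | _ n ih =>
    unfold digitsBE
    split
    · simpa using hk
    · rename_i hn
      rw [List.length_append, List.length_cons, List.length_nil]
      have hk2 : 2 ≤ k := by
        by_contra hcon
        interval_cases k <;> omega
      have : n / 10 < 10 ^ (k - 1) := by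
        have : 10 ^ k = 10 ^ (k - 1) * 10 := by
          rw [← pow_succ]
          congr 1
          omega
        omega
      have := ih (n / 10) (Nat.div_lt_self (by omega) (by omega)) (k - 1) (by omega) this
      omega

lemma valD_canon_pos (ds : List Int) (h : Canon ds) (hlen : 1 < ds.length ∨ 0 < ds.head!) :
    0 < valD ds := by
  obtain ⟨hne, hok, hhead⟩ := h
  obtain ⟨d, t, rfl⟩ := List.exists_cons_of_ne_nil hne
  have hd : 0 < d := by
    rcases hlen with hl | hl
    · simpa using hhead hl
    · simpa using hl
  rw [valD_cons]
  have ht : 0 ≤ valD t := valD_nonneg t (fun x hx => (hok x (by simp [hx])).1)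
  have : (0:Int) < 10 ^ t.length := by positivity
  nlinarith

-- uniqueness of canonical digit lists
lemma digitsBE_valD (ds : List Int) (h : Canon ds) : digitsBE (valD ds).toNat = ds := by
  induction ds using List.reverseRecOn with
  | nil => exact absurd rfl h.1
  | append_singleton ds d ih =>
    obtain ⟨hne, hok, hhead⟩ := h
    have hd : 0 ≤ d ∧ d < 10 := hok d (by simp)
    rcases List.eq_nil_or_concat ds with rfl | _
    · have hv : valD ([] ++ [d]) = d := by simp [valD]
      rw [hv]
      unfold digitsBE
      rw [dif_pos (by omega)]
      simp only [List.nil_append]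
      congr 1
      omega
    · have hdsne : ds ≠ [] := by
        rintro rfl
        simp_all
      have hok' : OkD ds := fun x hx => hok x (by simp [hx])
      have hcanon' : Canon ds := by
        refine ⟨hdsne, hok', fun hlen => ?_⟩
        obtain ⟨a, t, rfl⟩ := List.exists_cons_of_ne_nil hdsne
        have := hhead (by simp)
        simpa using this
      have hpos : 0 < valD ds := by
        apply valD_canon_pos ds hcanon'
        obtain ⟨a, t, rfl⟩ := List.exists_cons_of_ne_nil hdsne
        rcases Nat.lt_or_ge 1 (a :: t).length with hl | hl
        · exact Or.inl hl
        · right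
          have : t = [] := by
            cases t
            · rfl
            · simp at hl
          subst this
          have := hhead (by simp)
          simpa using this
      have hval : valD (ds ++ [d]) = 10 * valD ds + d := by
        rw [valD_append]
        simp [valD]
        ring
      rw [hval]
      have h10 : 10 ≤ (10 * valD ds + d).toNat := by omega
      unfold digitsBE
      rw [dif_neg (by omega)]
      have hq : (10 * valD ds + d).toNat / 10 = (valD ds).toNat := by omega
      have hr : (10 * valD ds + d).toNat % 10 = d.toNat := by omega
      rw [hq, hr, ih hcanon']
      congr 1
      simp
      omega

lemma toDigitsCore_eq (n : Nat) : ∀ (f : Nat) (l : List Char), n / 10 < f →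
    Nat.toDigitsCore 10 f n l = (digitsBE n).map charOf ++ l := by
  induction n using Nat.strong_induction_on with
  | _ n ih =>
    intro f l hf
    match f with
    | fuel + 1 =>
      rw [show Nat.toDigitsCore 10 (fuel + 1) n l =
          (if n / 10 = 0 then (n % 10).digitChar :: l
           else Nat.toDigitsCore 10 fuel (n / 10) ((n % 10).digitChar :: l)) from rfl]
      by_cases h0 : n / 10 = 0
      · rw [if_pos h0]
        have hn : n < 10 := by omega
        unfold digitsBE
        rw [dif_pos hn]
        simp [charOf]
        congr 1
        omega
      · rw [if_neg h0]
        have hlt : n / 10 < n := Nat.div_lt_self (by omega) (by omega)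
        have h2 : n / 10 / 10 < n / 10 := Nat.div_lt_self (by omega) (by omega)
        rw [ih (n / 10) hlt fuel ((n % 10).digitChar :: l) (by omega)]
        have heq : digitsBE n = digitsBE (n / 10) ++ [((n % 10 : Nat) : Int)] := by
          conv_lhs => unfold digitsBE
          rw [dif_neg (by omega)]
        rw [heq]
        simp [charOf]
        congr 1

lemma toChars_nonneg (n : Int) (h : 0 ≤ n) :
    PySem.Int.toChars n = (digitsBE n.toNat).map charOf := by
  rw [show PySem.Int.toChars n =
      (if n < 0 then '-' :: Nat.toDigits 10 n.natAbs else Nat.toDigits 10 n.toNat) from rfl]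
  rw [if_neg (by omega)]
  rw [show Nat.toDigits 10 n.toNat = Nat.toDigitsCore 10 (n.toNat + 1) n.toNat [] from rfl]
  rw [toDigitsCore_eq n.toNat (n.toNat + 1) []
    (by have := Nat.div_le_self n.toNat 10; omega)]
  simp

lemma charOf_lt (a b : Int) (ha : 0 ≤ a ∧ a < 10) (hb : 0 ≤ b ∧ b < 10) :
    (charOf a < charOf b) ↔ a < b := by
  obtain ⟨ha1, ha2⟩ := ha
  obtain ⟨hb1, hb2⟩ := hb
  interval_cases a <;> interval_cases b <;> simp [charOf] <;> decide

lemma charOf_isdigit (d : Int) (h : 0 ≤ d ∧ d < 10) : PySem.Chars.isdigit (charOf d) = true := by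
  obtain ⟨h1, h2⟩ := h
  interval_cases d <;> decide

lemma charOf_val (d : Int) (h : 0 ≤ d ∧ d < 10) : ((charOf d).toNat : Int) - 48 = d := by
  obtain ⟨h1, h2⟩ := h
  interval_cases d <;> decide

lemma isTidyGo_digits (ds : List Int) (p : Int) (hds : OkD ds) (hp : 0 ≤ p ∧ p < 10) :
    isTidyGo (ds.map charOf) (charOf p) = true ↔ List.IsChain (· ≤ ·) (p :: ds) := by
  induction ds generalizing p with
  | nil => simp [isTidyGo]
  | cons d t ih =>
    have hd := hds d (by simp)
    simp only [List.map_cons, isTidyGo]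
    rw [List.isChain_cons_cons]
    by_cases hlt : charOf d < charOf p
    · rw [if_pos hlt]
      have : d < p := (charOf_lt d p hd hp).mp hlt
      simp
      omega
    · rw [if_neg hlt]
      have hle : p ≤ d := by
        by_contra hcon
        exact hlt ((charOf_lt d p hd hp).mpr (by omega))
      rw [ih d (fun x hx => hds x (List.mem_cons_of_mem _ hx)) hd]
      tauto

lemma is_tidyA_iff (n : Int) (h : 0 ≤ n) :
    is_tidyA n = true ↔ TidyL (digitsBE n.toNat) := by
  unfold is_tidyA
  rw [toChars_nonneg n h]
  rw [show '0' = charOf 0 from rfl]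
  rw [isTidyGo_digits _ 0 (digitsBE_ok n.toNat) (by omega)]
  have hok := digitsBE_ok n.toNat
  constructor
  · intro hc
    rw [List.isChain_cons] at hc
    exact hc.2
  · intro hc
    rw [List.isChain_cons]
    refine ⟨fun y hy => ?_, hc⟩
    rcases List.head?_eq_some_iff.mp hy with ⟨t, ht⟩
    have := (hok y (by rw [ht]; simp)).1
    omega

lemma foldl_intDigits (ds : List Int) (h : OkD ds) (a : Int) :
    (ds.map charOf).foldl (fun x c => 10 * x + ((c.toNat : Int) - 48)) a =
      ds.foldl (fun x d => 10 * x + d) a := by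
  induction ds generalizing a with
  | nil => rfl
  | cons d t ih =>
    simp only [List.map_cons, List.foldl_cons]
    rw [charOf_val d (h d (by simp))]
    exact ih (fun x hx => h x (by simp [hx])) _

lemma intDigits?_digits (ds : List Int) (h0 : ds ≠ []) (h : OkD ds) :
    intDigits? (ds.map charOf) = some (valD ds) := by
  unfold intDigits?
  rw [if_pos ⟨by simpa using h0, by
    rw [List.all_eq_true]
    intro c hc
    rcases List.mem_map.mp hc with ⟨d, hd, rfl⟩
    exact charOf_isdigit d (h d hd)⟩]
  rw [foldl_intDigits ds h 0]
  rfl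

lemma get_digitA_eq (n : Int) (hn : 0 ≤ n) (place : Int) (hp : 0 ≤ place)
    (hlt : place.toNat < (digitsBE n.toNat).length) :
    get_digitA n place =
      (digitsBE n.toNat)[(digitsBE n.toNat).length - 1 - place.toNat]? := by
  unfold get_digitA
  rw [PySem.Chars.pyGet?_eq_listPyGet?, toChars_nonneg n hn]
  set ds := digitsBE n.toNat with hds
  have hk : -place - 1 = -((place.toNat + 1 : Nat) : Int) := by push_cast; omega
  rw [hk, PySem.List.pyGet?_neg_natCast (List.map charOf ds) (place.toNat + 1) (by omega)
    (by simp only [List.length_map]; omega)]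
  simp only [List.length_map]
  have hidx : ds.length - (place.toNat + 1) < ds.length := by omega
  rw [List.getElem?_map]
  have h1 : ds[ds.length - (place.toNat + 1)]? = some ds[ds.length - (place.toNat + 1)] :=
    List.getElem?_eq_getElem hidx
  rw [h1]
  simp only [Option.map_some, Option.bind_some]
  have hok := digitsBE_ok n.toNat
  have hd := hok ds[ds.length - (place.toNat + 1)] (List.getElem_mem _)
  have h2 : intDigits? [charOf ds[ds.length - (place.toNat + 1)]] =
      some (valD [ds[ds.length - (place.toNat + 1)]]) := by
    have := intDigits?_digits [ds[ds.length - (place.toNat + 1)]] (by simp)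
      (fun x hx => by
        have hxx : x = ds[ds.length - (place.toNat + 1)] := by simpa using hx
        rw [hxx]
        exact hd)
    simpa using this
  rw [h2]
  have h3 : valD [ds[ds.length - (place.toNat + 1)]] = ds[ds.length - (place.toNat + 1)] := by
    simp [valD]
  rw [h3]
  have h4 : ds.length - 1 - place.toNat = ds.length - (place.toNat + 1) := by omega
  rw [h4, List.getElem?_eq_getElem hidx]

lemma get_digits_uptoA_eq (n : Int) (hn : 0 ≤ n) (place : Int) (hp : 0 ≤ place)
    (hlt : place.toNat < (digitsBE n.toNat).length) :
    get_digits_uptoA n place =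
      some (valD ((digitsBE n.toNat).drop ((digitsBE n.toNat).length - (place.toNat + 1)))) := by
  unfold get_digits_uptoA
  rw [PySem.Chars.slice_eq_listSlice, toChars_nonneg n hn]
  set ds := digitsBE n.toNat with hds
  have hk : (some (-place - 1) : Option Int) = some (-((place.toNat + 1 : Nat) : Int)) := by
    congr 1
    push_cast
    omega
  rw [hk, PySem.List.slice_from_neg_natCast (List.map charOf ds) (place.toNat + 1) (by omega)]
  simp only [List.length_map]
  rw [← List.map_drop]
  apply intDigits?_digits
  · have : (ds.drop (ds.length - (place.toNat + 1))).length = place.toNat + 1 := by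
      rw [List.length_drop]
      omega
    intro hcon
    rw [hcon] at this
    simp at this
  · intro x hx
    exact digitsBE_ok n.toNat x (List.mem_of_mem_drop hx)

lemma tidyStep_of_tidy (ds : List Int) (h : TidyL ds) : ds.foldr tidyStep [] = ds := by
  induction ds with
  | nil => rfl
  | cons d t ih =>
    rw [List.foldr_cons]
    match t, h with
    | [], _ => rfl
    | b :: t', h =>
      rw [show TidyL (d :: b :: t') = List.IsChain (· ≤ ·) (d :: b :: t') from rfl,
        List.isChain_cons_cons] at h
      obtain ⟨h1, h2⟩ := h
      rw [ih h2]
      have hstep : tidyStep d (b :: t') =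
          if d > b then (d - 1) :: List.replicate (t'.length + 1) 9 else d :: b :: t' := rfl
      rw [hstep, if_neg (by omega)]

lemma chain'_short (l : List Int) (h : l.length ≤ 1) : List.IsChain (· ≤ ·) l := by
  match l with
  | [] => simp
  | [a] => simp
  | a :: b :: t => simp at h

lemma chain_cons_replicate9 (d : Int) (h : d ≤ 9) (k : Nat) :
    List.IsChain (· ≤ ·) (d :: List.replicate k (9 : Int)) := by
  induction k generalizing d with
  | zero => simp
  | succ m ih =>
    rw [List.replicate_succ, List.isChain_cons_cons]
    exact ⟨h, ih 9 le_rfl⟩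

lemma tidy_replicate9 (k : Nat) : TidyL (List.replicate k (9 : Int)) := by
  match k with
  | 0 => simp [TidyL]
  | m + 1 =>
    rw [List.replicate_succ]
    exact chain_cons_replicate9 9 le_rfl m

lemma canon_replicate9 (k : Nat) (hk : 0 < k) : Canon (List.replicate k (9 : Int)) := by
  refine ⟨by simp; omega, fun d hd => ?_, fun _ => ?_⟩
  · rw [List.eq_of_mem_replicate hd]; omega
  · match k, hk with
    | m + 1, _ => simp [List.replicate_succ]

lemma mainLoop (fuel : Nat) (ds : List Int) (i : Int) (hc : Canon ds)
    (hi1 : 1 ≤ i) (hile : i.toNat ≤ ds.length)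
    (htidy : TidyL (ds.drop (ds.length - i.toNat)))
    (hfuel : ds.length + 2 ≤ fuel + i.toNat) :
    tidyLoopA fuel (valD ds) i = valD (ds.foldr tidyStep []) := by
  induction fuel generalizing ds i with
  | zero => omega
  | succ fuel ih =>
    have hok : OkD ds := hc.2.1
    have hnn : 0 ≤ valD ds := valD_nonneg ds (fun d hd => (hok d hd).1)
    have hback : digitsBE (valD ds).toNat = ds := digitsBE_valD ds hc
    rw [show tidyLoopA (fuel + 1) (valD ds) i =
        (if is_tidyA (valD ds) then valD ds
         else
           match get_digitA (valD ds) (i - 1), get_digitA (valD ds) i with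
           | some prev, some curr =>
             if curr > prev then
               match get_digits_uptoA (valD ds) (i - 1) with
               | some v => tidyLoopA fuel (valD ds - (v + 1)) (i + 1)
               | none => valD ds
             else tidyLoopA fuel (valD ds) (i + 1)
           | _, _ => valD ds) from rfl]
    by_cases ht : is_tidyA (valD ds) = true
    · rw [if_pos ht]
      have : TidyL ds := by
        have := (is_tidyA_iff (valD ds) hnn).mp ht
        rwa [hback] at this
      rw [tidyStep_of_tidy ds this]
    · rw [if_neg ht]
      have hnotidy : ¬ TidyL ds := fun hcon => ht (by
        rw [is_tidyA_iff (valD ds) hnn, hback]; exact hcon)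
      have hilt : i.toNat < ds.length := by
        rcases Nat.lt_or_ge i.toNat ds.length with h | h
        · exact h
        · exfalso
          apply hnotidy
          have : ds.length - i.toNat = 0 := by omega
          rw [this, List.drop_zero] at htidy
          exact htidy
      set len := ds.length with hlen
      have hidxp : len - i.toNat < len := by omega
      have hidxc : len - 1 - i.toNat < len := by omega
      have hprev : get_digitA (valD ds) (i - 1) = some ds[len - i.toNat] := by
        rw [get_digitA_eq (valD ds) hnn (i - 1) (by omega)
          (by rw [hback]; omega)]
        rw [hback]
        have : len - 1 - (i - 1).toNat = len - i.toNat := by omega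
        rw [this, List.getElem?_eq_getElem hidxp]
      have hcurr : get_digitA (valD ds) i = some ds[len - 1 - i.toNat] := by
        rw [get_digitA_eq (valD ds) hnn i (by omega) (by rw [hback]; omega)]
        rw [hback, List.getElem?_eq_getElem hidxc]
      rw [hprev, hcurr]
      rw [show (match some ds[len - i.toNat], some ds[len - 1 - i.toNat] with
          | some prev, some curr =>
            if curr > prev then
              match get_digits_uptoA (valD ds) (i - 1) with
              | some v => tidyLoopA fuel (valD ds - (v + 1)) (i + 1)
              | none => valD ds
            else tidyLoopA fuel (valD ds) (i + 1)
          | _, _ => valD ds) =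
          (if ds[len - 1 - i.toNat] > ds[len - i.toNat] then
              match get_digits_uptoA (valD ds) (i - 1) with
              | some v => tidyLoopA fuel (valD ds - (v + 1)) (i + 1)
              | none => valD ds
            else tidyLoopA fuel (valD ds) (i + 1)) from rfl]
      set prev := ds[len - i.toNat] with hprevd
      set curr := ds[len - 1 - i.toNat] with hcurrd
      set suf := ds.drop (len - i.toNat) with hsuf
      have hsuflen : suf.length = i.toNat := by
        rw [hsuf, List.length_drop]
        omega
      have hsufcons : suf = prev :: ds.drop (len - i.toNat + 1) := by
        rw [hsuf, List.drop_eq_getElem_cons hidxp]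
      have hdrop1 : ds.drop (len - i.toNat - 1) = ds[len - i.toNat - 1] :: suf := by
        rw [List.drop_eq_getElem_cons (by omega : len - i.toNat - 1 < len), hsuf]
        congr 2
        omega
      have hcurr1 : curr = ds[len - i.toNat - 1] := by
        rw [hcurrd]
        congr 1
        omega
      have hdecomp : ds = ds.take (len - i.toNat - 1) ++ curr :: suf := by
        conv_lhs => rw [← List.take_append_drop (len - i.toNat - 1) ds]
        rw [hdrop1, hcurr1]
      set pre := ds.take (len - i.toNat - 1) with hpre
      have hprelen : pre.length = len - i.toNat - 1 := by
        rw [hpre, List.length_take]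
        omega
      by_cases hgt : curr > prev
      · rw [if_pos hgt]
        have hupto : get_digits_uptoA (valD ds) (i - 1) = some (valD suf) := by
          rw [get_digits_uptoA_eq (valD ds) hnn (i - 1) (by omega) (by rw [hback]; omega)]
          rw [hback]
          have hidxe : ds.length - ((i - 1).toNat + 1) = len - i.toNat := by omega
          rw [hidxe]
        rw [hupto]
        rw [show (match some (valD suf) with
            | some v => tidyLoopA fuel (valD ds - (v + 1)) (i + 1)
            | none => valD ds) = tidyLoopA fuel (valD ds - (valD suf + 1)) (i + 1) from rfl]
        have hcurrok := hok curr (by rw [hdecomp]; simp)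
        have hprevok := hok prev (by rw [hdecomp, hsufcons]; simp)
        -- the modified digit list
        set ds' := pre ++ (curr - 1) :: List.replicate i.toNat (9 : Int) with hds'
        have hds'len : ds'.length = len := by
          rw [hds', List.length_append, hprelen]
          simp
          omega
        have hokpre : ∀ d ∈ pre, 0 ≤ d ∧ d < 10 := fun d hd =>
          hok d (List.mem_of_mem_take hd)
        have hok' : OkD ds' := by
          intro d hd
          rw [hds'] at hd
          rcases List.mem_append.mp hd with hd | hd
          · exact hokpre d hd
          · rcases List.mem_cons.mp hd with rfl | hd
            · omega
            · rw [List.eq_of_mem_replicate hd]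
              omega
        -- value of the new number
        have hval' : valD ds - (valD suf + 1) = valD ds' := by
          have h1 : valD ds = valD pre * 10 ^ (i.toNat + 1) + (curr * 10 ^ i.toNat + valD suf) := by
            conv_lhs => rw [hdecomp]
            rw [valD_append, valD_cons, List.length_cons, hsuflen]
          have h2 : valD ds' = valD pre * 10 ^ (i.toNat + 1) +
              ((curr - 1) * 10 ^ i.toNat + (10 ^ i.toNat - 1)) := by
            rw [hds', valD_append, valD_cons, valD_replicate9, List.length_cons,
              List.length_replicate]
          have h3 : (10:Int) ^ (i.toNat + 1) = 10 * 10 ^ i.toNat := by ring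
          rw [h1, h2]
          ring
        rw [hval']
        -- the greedy fold is preserved
        have hsuftidy : TidyL suf := htidy
        have hfold : ds.foldr tidyStep [] = ds'.foldr tidyStep [] := by
          conv_lhs => rw [hdecomp]
          rw [hds', List.foldr_append, List.foldr_append, List.foldr_cons, List.foldr_cons]
          congr 1
          rw [tidyStep_of_tidy suf hsuftidy, tidyStep_of_tidy _ (tidy_replicate9 i.toNat)]
          rw [hsufcons]
          have hstep1 : tidyStep curr (prev :: ds.drop (len - i.toNat + 1)) =
              (curr - 1) :: List.replicate ((ds.drop (len - i.toNat + 1)).length + 1) 9 := by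
            rw [show tidyStep curr (prev :: ds.drop (len - i.toNat + 1)) =
              if curr > prev then (curr - 1) :: List.replicate ((ds.drop (len - i.toNat + 1)).length + 1) 9
              else curr :: prev :: ds.drop (len - i.toNat + 1) from rfl, if_pos hgt]
          rw [hstep1]
          have hlen2 : (ds.drop (len - i.toNat + 1)).length + 1 = i.toNat := by
            rw [List.length_drop]
            omega
          rw [hlen2]
          obtain ⟨k, hk⟩ : ∃ k, i.toNat = k + 1 := ⟨i.toNat - 1, by omega⟩
          rw [hk, List.replicate_succ]
          have hstep2 : tidyStep (curr - 1) (9 :: List.replicate k (9:Int)) =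
              if curr - 1 > 9 then
                (curr - 1 - 1) :: List.replicate ((List.replicate k (9:Int)).length + 1) 9
              else (curr - 1) :: 9 :: List.replicate k (9:Int) := rfl
          rw [hstep2, if_neg (by omega)]
        -- tidiness of the new suffix
        have htidy' : TidyL (ds'.drop (ds'.length - (i + 1).toNat)) := by
          have h5 : ds'.length - (i + 1).toNat = pre.length := by omega
          rw [h5, hds', List.drop_left]
          exact chain_cons_replicate9 (curr - 1) (by omega) i.toNat
        by_cases hshrink : pre = [] ∧ curr = 1
        · -- the leading digit 1 becomes 0: the next number is all 9s, tidy; one more step exits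
          obtain ⟨hpnil, hc1⟩ := hshrink
          have hval9 : valD ds' = valD (List.replicate i.toNat (9 : Int)) := by
            rw [hds', hpnil, hc1]
            simp
            rw [valD_cons]
            simp
          have hit : i.toNat = len - 1 := by
            have := hprelen
            rw [hpnil] at this
            simp at this
            omega
          obtain ⟨fuel', rfl⟩ : ∃ f', fuel = f' + 1 := ⟨fuel - 1, by omega⟩
          · have hcanon9 := canon_replicate9 i.toNat (by omega)
            have hnn9 : 0 ≤ valD ds' := valD_nonneg ds' (fun d hd => (hok' d hd).1)
            have htidy9 : is_tidyA (valD ds') = true := by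
              rw [is_tidyA_iff (valD ds') hnn9]
              rw [hval9, digitsBE_valD _ hcanon9]
              exact tidy_replicate9 i.toNat
            rw [show tidyLoopA (fuel' + 1) (valD ds') (i + 1) =
                (if is_tidyA (valD ds') then valD ds'
                 else
                   match get_digitA (valD ds') (i + 1 - 1), get_digitA (valD ds') (i + 1) with
                   | some prev, some curr =>
                     if curr > prev then
                       match get_digits_uptoA (valD ds') (i + 1 - 1) with
                       | some v => tidyLoopA fuel' (valD ds' - (v + 1)) (i + 1 + 1)
                       | none => valD ds'
                     else tidyLoopA fuel' (valD ds') (i + 1 + 1)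
                   | _, _ => valD ds') from rfl, if_pos htidy9]
            rw [hfold]
            have htids' : TidyL ds' := by
              rw [hds', hpnil, hc1]
              simpa using chain_cons_replicate9 (1 - 1) (by omega) i.toNat
            rw [tidyStep_of_tidy ds' htids']
        · -- no leading-zero shrink: the new list is canonical, recurse
          have hcanon' : Canon ds' := by
            refine ⟨by rw [hds']; simp, hok', fun hl => ?_⟩
            by_cases hpnil : pre = []
            · have h8 : len - i.toNat - 1 = 0 := by
                have := hprelen
                rw [hpnil] at this
                simp at this
                omega
              have hcurr0 : 0 < curr := by
                have h7 := hc.2.2 (by omega)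
                obtain ⟨a, t, hat⟩ := List.exists_cons_of_ne_nil hc.1
                have ha : ds.head! = a := by rw [hat]; simp
                have hget : ds[len - i.toNat - 1]'(by omega) = a := by
                  simp only [h8]
                  rw [List.getElem_of_eq hat]
                  simp
                rw [hcurr1, hget, ← ha]
                exact h7
              have hc2 : 2 ≤ curr := by
                by_contra hcon
                exact hshrink ⟨hpnil, by omega⟩
              rw [hds', hpnil]
              simp
              omega
            · obtain ⟨p, pr, hppr⟩ := List.exists_cons_of_ne_nil hpnil
              have hp0 : 0 < p := by
                have h7 := hc.2.2 (by omega)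
                have h9 : ds.head! = p := by
                  rw [hdecomp, hppr]
                  simp
                rw [h9] at h7
                exact h7
              rw [hds', hppr]
              simpa using hp0
          rw [ih ds' (i + 1) hcanon' (by omega) (by omega) htidy' (by omega), hfold]
      · rw [if_neg hgt]
        have htidy2 : TidyL (ds.drop (ds.length - (i + 1).toNat)) := by
          show List.IsChain (· ≤ ·) (ds.drop (ds.length - (i + 1).toNat))
          have h5 : ds.length - (i + 1).toNat = len - i.toNat - 1 := by omega
          rw [h5, List.drop_eq_getElem_cons (by omega : len - i.toNat - 1 < len)]
          have h6 : len - i.toNat - 1 + 1 = len - i.toNat := by omega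
          rw [h6, List.isChain_cons]
          refine ⟨fun y hy => ?_, htidy⟩
          have hh : (List.drop (len - i.toNat) ds).head? = some prev := by
            rw [List.drop_eq_getElem_cons hidxp]
            rfl
          rw [hh] at hy
          simp at hy
          subst hy
          rw [← hcurr1]
          omega
        exact ih ds (i + 1) hc (by omega) (by omega) htidy2 (by omega)

lemma alt_eq (n : Int) (h : 0 ≤ n) :
    last_tidy_number_alt n = valD ((digitsBE n.toNat).foldr tidyStep []) := by
  unfold last_tidy_number_alt
  rw [toChars_nonneg n h, List.foldl_reverse, List.foldr_map]
  have hok := digitsBE_ok n.toNat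
  have hfold : ∀ (ds : List Int), OkD ds →
      ds.foldr (fun c s => tidyStep ((charOf c).toNat - 48 : Int) s) [] = ds.foldr tidyStep [] := by
    intro ds hds
    induction ds with
    | nil => rfl
    | cons d t ih =>
      simp only [List.foldr_cons]
      rw [ih (fun x hx => hds x (by simp [hx])), charOf_val d (hds d (by simp))]
  rw [hfold _ hok]
  rfl

-- ===== VERDICT (by name: the statement is the Claim_ definition above) =====
theorem last_tidy_number_spec : Claim_equal_last_tidy_number := by
  intro number hdom hpre
  unfold Spec_last_tidy_number
  have h0 : 0 ≤ number := hpre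
  have hbound : number ≤ 2147483648 := by
    have := hdom
    unfold Dom_last_tidy_number pvDomInt at this
    simpa using (of_decide_eq_true this).2
  set ds := digitsBE number.toNat with hds
  have hval : valD ds = number := by
    rw [hds, valD_digitsBE]
    omega
  have hlenub : ds.length ≤ 11 := by
    apply digitsBE_length_le 11 number.toNat (by omega)
    have : (10:Nat) ^ 11 = 100000000000 := by norm_num
    omega
  have hlen1 : 1 ≤ ds.length := by
    have := digitsBE_ne_nil number.toNat
    rw [← hds] at this
    exact List.length_pos_of_ne_nil this
  have hmain := mainLoop 64 ds 1 (digitsBE_canon number.toNat) le_rfl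
    (by simpa using hlen1)
    (by
      apply chain'_short
      rw [List.length_drop]
      omega)
    (by omega)
  rw [alt_eq number h0, ← hds]
  unfold last_tidy_number
  rw [← hval]
  exact hmain
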